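-- pv_equiv track=rewrite | github.com/dmitrav/stepik-algorithms | countsort.py | stable_countsort
-- ===== SOURCE A (Python) =====
-- def stable_countsort(numbers):
--
--     counts = [0] * 10
--
--     for j in range(len(numbers)):
--         counts[numbers[j]-1] += 1
--
--     # build cumulative counts
--     for i in range(1, 10):
--         counts[i] = counts[i-1] + counts[i]
--
--     sorted_numbers = [0] * len(numbers)
--     for i in reversed(range(len(numbers))):
--         sorted_numbers[counts[numbers[i]-1]-1] = numbers[i]
--         counts[numbers[i]-1] -= 1
--
--     return sorted_numbers
-- ===== SOURCE B (Python) =====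
-- def stable_countsort(numbers):
--     buckets = [[] for _ in range(10)]
--     for x in numbers:
--         buckets[x - 1].append(x)
--     result = []
--     for b in buckets:
--         result.extend(b)
--     return result
-- ===== Notes on version B (the rewrite author's own statement) =====
-- stated objective: simpler
-- what changed: Replaces the three-pass counting sort (count, cumulate, backward placement into a preallocated array) by a single forward pass appending each element to one of ten buckets followed by concatenating the buckets.
import Mathlib
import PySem

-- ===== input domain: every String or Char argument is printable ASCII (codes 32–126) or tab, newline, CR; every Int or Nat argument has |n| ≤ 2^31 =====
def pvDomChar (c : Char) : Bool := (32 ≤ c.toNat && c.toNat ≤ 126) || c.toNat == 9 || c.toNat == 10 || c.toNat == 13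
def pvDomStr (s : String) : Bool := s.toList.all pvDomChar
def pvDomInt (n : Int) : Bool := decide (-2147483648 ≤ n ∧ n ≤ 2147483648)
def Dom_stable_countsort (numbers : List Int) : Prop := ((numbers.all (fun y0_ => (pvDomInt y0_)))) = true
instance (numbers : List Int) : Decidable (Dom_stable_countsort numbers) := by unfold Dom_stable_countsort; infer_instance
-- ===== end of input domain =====

-- B replaces A's three-pass counting sort (count, cumulate, backward placement) by one
-- bucket-append pass plus concatenation of the ten buckets (objective: simpler).


-- ===== PORT A =====
def pvCountPass (numbers : List Int) (counts0 : List Int) : List Int :=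
  (PySem.List.pyRange 0 (numbers.length : Int) 1).foldl
    (fun counts j =>
      PySem.List.pySetD counts (PySem.List.pyGetD numbers j 0 - 1)
        (PySem.List.pyGetD counts (PySem.List.pyGetD numbers j 0 - 1) 0 + 1)) counts0

def pvCumPass (counts0 : List Int) : List Int :=
  (PySem.List.pyRange 1 10 1).foldl
    (fun counts i =>
      PySem.List.pySetD counts i
        (PySem.List.pyGetD counts (i - 1) 0 + PySem.List.pyGetD counts i 0)) counts0

def pvPlacePass (numbers : List Int) (st0 : List Int × List Int) : List Int × List Int :=
  ((PySem.List.pyRange 0 (numbers.length : Int) 1).reverse).foldl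
    (fun st i =>
      (PySem.List.pySetD st.1 (PySem.List.pyGetD numbers i 0 - 1)
         (PySem.List.pyGetD st.1 (PySem.List.pyGetD numbers i 0 - 1) 0 - 1),
       PySem.List.pySetD st.2 (PySem.List.pyGetD st.1 (PySem.List.pyGetD numbers i 0 - 1) 0 - 1)
         (PySem.List.pyGetD numbers i 0))) st0

def stable_countsort (numbers : List Int) : List Int :=
  (pvPlacePass numbers (pvCumPass (pvCountPass numbers (List.replicate 10 0)),
    List.replicate numbers.length 0)).2

-- ===== PORT B =====
def pvBucketPass (numbers : List Int) (buckets0 : List (List Int)) : List (List Int) :=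
  numbers.foldl
    (fun buckets x =>
      PySem.List.pySetD buckets (x - 1) (PySem.List.pyGetD buckets (x - 1) [] ++ [x])) buckets0

def stable_countsort_alt (numbers : List Int) : List Int :=
  (pvBucketPass numbers (List.replicate 10 ([] : List Int))).foldl
    (fun result b => result ++ b) []

-- ===== PRECONDITION & SPEC =====
-- Pre_ excludes exactly the inputs on which A raises IndexError: an element x with x-1
-- outside the valid index range -10..9 of the 10-cell counts list (B raises there too).
def Pre_stable_countsort (numbers : List Int) : Prop := ∀ x ∈ numbers, -9 ≤ x ∧ x ≤ 10
instance (numbers : List Int) : Decidable (Pre_stable_countsort numbers) := by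
  unfold Pre_stable_countsort; infer_instance
def pvWitness_stable_countsort : List Int := [3, 1, 10, -9, 0, 3, 1]

def Spec_stable_countsort (numbers : List Int) (out : List Int) : Prop := out = stable_countsort_alt numbers
instance (numbers : List Int) (out : List Int) : Decidable (Spec_stable_countsort numbers out) := by unfold Spec_stable_countsort; infer_instance

-- ===== CLAIM (what is proved, stated in full; the proofs are below) =====
def Claim_equal_stable_countsort : Prop := ∀ (numbers : List Int), Dom_stable_countsort numbers → Pre_stable_countsort numbers → Spec_stable_countsort numbers (stable_countsort numbers)

-- ===== LEMMAS AND PROOFS =====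

def pvKey (x : Int) : Nat := ((x - 1) % 10).toNat
theorem pvKey_lt (x : Int) : pvKey x < 10 := by unfold pvKey; omega
theorem pvPyGetD_key {α : Type} (xs : List α) (h : xs.length = 10) (x : Int)
    (hx : -9 ≤ x ∧ x ≤ 10) (d : α) :
    PySem.List.pyGetD xs (x - 1) d = xs.getD (pvKey x) d := by
  by_cases hx1 : 1 ≤ x
  · rw [PySem.List.pyGetD_eq_getElem xs d (by omega) (by omega)]
    have hk : pvKey x = (x-1).toNat := by unfold pvKey; omega
    rw [hk, List.getD_eq_getElem xs d (by omega)]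
  · have hk : pvKey x = (x + 9).toNat := by unfold pvKey; omega
    have hi : x - 1 = -(((1 - x).toNat : Int)) := by
      rw [Int.toNat_of_nonneg (by omega : (0:Int) ≤ 1 - x)]; omega
    rw [hi, PySem.List.pyGetD_neg_natCast xs _ d (by omega) (by omega)]
    rw [hk, List.getD_eq_getElem xs d (by omega)]
    congr 1
    omega
theorem pvPySetD_key {α : Type} (xs : List α) (h : xs.length = 10) (x : Int)
    (hx : -9 ≤ x ∧ x ≤ 10) (v : α) :
    PySem.List.pySetD xs (x - 1) v = xs.set (pvKey x) v := by
  by_cases hx1 : 1 ≤ x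
  · rw [PySem.List.pySetD_of_nonneg xs v (by omega)]
    have hk : pvKey x = (x-1).toNat := by unfold pvKey; omega
    rw [hk]
  · have hk : pvKey x = (x + 9).toNat := by unfold pvKey; omega
    have hi : x - 1 = -(((1 - x).toNat : Int)) := by
      rw [Int.toNat_of_nonneg (by omega : (0:Int) ≤ 1 - x)]; omega
    simp only [PySem.List.pySetD, PySem.List.pySet?, PySem.List.pyIdx?, h]
    rw [if_neg (by omega), if_pos (by omega)]
    simp only [Option.map_some, Option.getD_some]
    rw [hk]
    congr 1
    omega

def pvCnt (l : List Int) (k : Nat) : Nat := l.countP (fun x => pvKey x = k)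

theorem pvCnt_cons (x : Int) (l : List Int) (k : Nat) :
    pvCnt (x :: l) k = pvCnt l k + (if pvKey x = k then 1 else 0) := by
  unfold pvCnt
  rw [List.countP_cons]
  simp

theorem pvSet_map_range {α : Type} (n k : Nat) (hk : k < n) (g : Nat → α) (v : α) :
    ((List.range n).map g).set k v
      = (List.range n).map (fun j => if j = k then v else g j) := by
  apply List.ext_getElem
  · simp
  · intro i h1 h2
    simp only [List.getElem_set, List.getElem_map, List.getElem_range]
    split_ifs with h3 h4 h4
    · rfl
    · exact absurd h3.symm h4
    · exact absurd h4.symm h3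
    · rfl

theorem pvMap_range_congr {α : Type} (n : Nat) (f g : Nat → α) (h : ∀ k < n, f k = g k) :
    (List.range n).map f = (List.range n).map g := by
  apply List.map_congr_left
  intro k hk
  exact h k (List.mem_range.mp hk)

theorem pvPhase1 (l : List Int) (hl : ∀ x ∈ l, -9 ≤ x ∧ x ≤ 10) (g : Nat → Int) :
    l.foldl (fun counts x =>
        PySem.List.pySetD counts (x - 1) (PySem.List.pyGetD counts (x - 1) 0 + 1))
      ((List.range 10).map g)
      = (List.range 10).map (fun k => g k + (pvCnt l k : Int)) := by
  induction l generalizing g with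
  | nil =>
    simp [List.foldl]
  | cons x l ih =>
    have hx := hl x (by simp)
    have hlen : ((List.range 10).map g).length = 10 := by simp
    rw [List.foldl_cons,
        pvPyGetD_key _ hlen x hx 0,
        pvPySetD_key _ hlen x hx,
        PySem.List.getD_map_range g 10 (pvKey x) 0 (pvKey_lt x),
        pvSet_map_range 10 (pvKey x) (pvKey_lt x) g,
        ih (fun y hy => hl y (by simp [hy]))]
    apply pvMap_range_congr
    intro k hk
    rw [pvCnt_cons]
    by_cases hkk : k = pvKey x
    · subst hkk; rw [if_pos rfl, if_pos rfl]; push_cast; ring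
    · rw [if_neg hkk, if_neg (fun e => hkk e.symm)]
      push_cast
      ring

def pvCum (f : Nat → Int) (k : Nat) : Int := ((List.range (k+1)).map f).sum

theorem pvCum_succ (f : Nat → Int) (k : Nat) : pvCum f (k+1) = pvCum f k + f (k+1) := by
  simp [pvCum, List.range_succ]
  ring

theorem pvPhase2Aux (f : Nat → Int) (m : Nat) (h1 : 1 ≤ m) (hm : m ≤ 10) :
    (PySem.List.pyRange 1 (m : Int) 1).foldl
      (fun counts i => PySem.List.pySetD counts i
        (PySem.List.pyGetD counts (i - 1) 0 + PySem.List.pyGetD counts i 0))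
      ((List.range 10).map f)
      = (List.range 10).map (fun k => if k < m then pvCum f k else f k) := by
  induction m with
  | zero => omega
  | succ m ih =>
    by_cases hm0 : m = 0
    · subst hm0
      rw [PySem.List.pyRange_one_eq_nil (by norm_num)]
      simp only [List.foldl_nil]
      apply pvMap_range_congr
      intro k hk
      by_cases hk1 : k < 1
      · have : k = 0 := by omega
        subst this
        simp [pvCum]
      · rw [if_neg hk1]
    · have hm1 : 1 ≤ m := by omega
      have hsplit : ((m+1 : Nat) : Int) = (m : Int) + 1 := by push_cast; ring
      rw [hsplit, PySem.List.pyRange_one_succ_right (by exact_mod_cast hm1), List.foldl_append,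
          ih hm1 (by omega)]
      set g : Nat → Int := fun k => if k < m then pvCum f k else f k with hg
      have hlen : ((List.range 10).map g).length = 10 := by simp
      simp only [List.foldl_cons, List.foldl_nil]
      have hgm1 : PySem.List.pyGetD ((List.range 10).map g) ((m:Int) - 1) 0 = g (m-1) := by
        rw [PySem.List.pyGetD_eq_getElem _ 0 (by omega) (by rw [hlen]; push_cast; omega)]
        have ht : ((m:Int) - 1).toNat = m - 1 := by omega
        simp only [ht, List.getElem_map, List.getElem_range]
      have hgm : PySem.List.pyGetD ((List.range 10).map g) (m:Int) 0 = g m := by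
        rw [PySem.List.pyGetD_eq_getElem _ 0 (by omega) (by rw [hlen]; push_cast; omega)]
        simp only [Int.toNat_natCast, List.getElem_map, List.getElem_range]
      rw [hgm1, hgm, PySem.List.pySetD_of_nonneg _ _ (by omega)]
      have : ((m:Int)).toNat = m := by omega
      rw [this, pvSet_map_range 10 m (by omega) g]
      apply pvMap_range_congr
      intro k hk
      by_cases hkm : k = m
      · subst hkm
        rw [if_pos rfl, if_pos (by omega)]
        have hgk1 : g (k-1) = pvCum f (k-1) := by simp only [hg]; rw [if_pos (by omega)]
        have hgk : g k = f k := by simp only [hg]; rw [if_neg (by omega)]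
        rw [hgk1, hgk]
        have : k = (k-1) + 1 := by omega
        rw [this, pvCum_succ]
        simp
      · rw [if_neg hkm]
        simp only [hg]
        by_cases hlt : k < m
        · rw [if_pos hlt, if_pos (by omega)]
        · rw [if_neg hlt, if_neg (by omega)]

theorem pvFlatten_set {α : Type} (bs : List (List α)) (k m : Nat) (hk : k < bs.length)
    (hm : m < (bs[k]'hk).length) (x : α) :
    bs.flatten.set ((((bs.take k).map List.length).sum) + m) x
      = (bs.set k ((bs[k]'hk).set m x)).flatten := by
  induction bs generalizing k with
  | nil => simp at hk
  | cons b bs ih =>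
    cases k with
    | zero =>
      simp only [List.take_zero, List.map_nil, List.sum_nil, Nat.zero_add,
        List.flatten_cons, List.set_cons_zero, List.getElem_cons_zero]
      rw [List.set_append]
      rw [if_pos (by simpa using hm)]
    | succ k =>
      simp only [List.take_succ_cons, List.map_cons, List.sum_cons, List.flatten_cons,
        List.set_cons_succ, List.getElem_cons_succ]
      rw [List.set_append, if_neg (by omega)]
      have hpos : b.length + (((bs.take k).map List.length).sum + m) - b.length
          = ((bs.take k).map List.length).sum + m := by omega
      rw [Nat.add_assoc, hpos, ih k (by simpa using hk) (by simpa using hm)]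

def pvLoff (l : List Int) (k : Nat) : Nat := ((List.range k).map (fun j => pvCnt l j)).sum

def pvSeg (p s : List Int) (k : Nat) : List Int :=
  List.replicate (pvCnt p k) 0 ++ s.filter (fun x => pvKey x = k)

def pvCountsInv (p s : List Int) : List Int :=
  (List.range 10).map (fun k => ((pvLoff (p ++ s) k + pvCnt p k : Nat) : Int))

def pvSortedInv (p s : List Int) : List Int := ((List.range 10).map (pvSeg p s)).flatten

theorem pvCnt_append (a b : List Int) (k : Nat) : pvCnt (a ++ b) k = pvCnt a k + pvCnt b k := by
  unfold pvCnt; rw [List.countP_append]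

theorem pvCnt_singleton (x : Int) (k : Nat) :
    pvCnt [x] k = if pvKey x = k then 1 else 0 := by
  unfold pvCnt; simp [List.countP_cons]

theorem pvLen_seg (p s : List Int) (k : Nat) :
    (pvSeg p s k).length = pvCnt p k + pvCnt s k := by
  unfold pvSeg pvCnt
  simp [← List.countP_eq_length_filter]

theorem pvTake_sum (p s : List Int) (k : Nat) (hk : k ≤ 10) :
    (((((List.range 10).map (pvSeg p s)).take k).map List.length).sum) = pvLoff (p ++ s) k := by
  rw [← List.map_take, List.take_range, Nat.min_eq_left hk, List.map_map]
  unfold pvLoff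
  congr 1
  apply List.map_congr_left
  intro j hj
  simp only [Function.comp_apply]
  rw [pvLen_seg, pvCnt_append]

theorem pvSet_replicate (n : Nat) (rest : List Int) (x : Int) :
    (List.replicate (n+1) (0:Int) ++ rest).set n x = List.replicate n 0 ++ x :: rest := by
  induction n with
  | zero => simp
  | succ n ih =>
    rw [List.replicate_succ, List.cons_append, List.set_cons_succ, ih, List.replicate_succ,
        List.cons_append]

theorem pvPhase3 (p s : List Int) (hp : ∀ x ∈ p, -9 ≤ x ∧ x ≤ 10) :
    p.reverse.foldl
      (fun st x =>
        (PySem.List.pySetD st.1 (x - 1) (PySem.List.pyGetD st.1 (x - 1) 0 - 1),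
         PySem.List.pySetD st.2 (PySem.List.pyGetD st.1 (x - 1) 0 - 1) x))
      (pvCountsInv p s, pvSortedInv p s)
      = (pvCountsInv [] (p ++ s), pvSortedInv [] (p ++ s)) := by
  induction p using List.reverseRecOn generalizing s with
  | nil => simp
  | append_singleton q x ih =>
    have hx : -9 ≤ x ∧ x ≤ 10 := hp x (by simp)
    have hq : ∀ y ∈ q, -9 ≤ y ∧ y ≤ 10 := fun y hy => hp y (by simp [hy])
    rw [List.reverse_append, List.reverse_singleton, List.singleton_append, List.foldl_cons]
    have hassoc : (q ++ [x]) ++ s = q ++ (x :: s) := by simp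
    have hcntp : pvCnt (q ++ [x]) (pvKey x) = pvCnt q (pvKey x) + 1 := by
      rw [pvCnt_append, pvCnt_singleton, if_pos rfl]
    have hlenc : (pvCountsInv (q ++ [x]) s).length = 10 := by
      unfold pvCountsInv; simp
    -- the counts value read for x
    have hc : PySem.List.pyGetD (pvCountsInv (q ++ [x]) s) (x - 1) 0
        = ((pvLoff ((q ++ [x]) ++ s) (pvKey x) + pvCnt (q ++ [x]) (pvKey x) : Nat) : Int) := by
      rw [pvPyGetD_key _ hlenc x hx 0]
      unfold pvCountsInv
      rw [PySem.List.getD_map_range _ 10 (pvKey x) 0 (pvKey_lt x)]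
    -- the new counts list
    have hcounts : PySem.List.pySetD (pvCountsInv (q ++ [x]) s) (x - 1)
        (PySem.List.pyGetD (pvCountsInv (q ++ [x]) s) (x - 1) 0 - 1)
        = pvCountsInv q (x :: s) := by
      rw [hc, pvPySetD_key _ hlenc x hx]
      unfold pvCountsInv
      rw [pvSet_map_range 10 (pvKey x) (pvKey_lt x)]
      apply pvMap_range_congr
      intro k hk
      by_cases hkk : k = pvKey x
      · subst hkk
        rw [if_pos rfl, hassoc, hcntp]
        push_cast
        ring
      · rw [if_neg hkk, hassoc]
        have : pvCnt (q ++ [x]) k = pvCnt q k := by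
          rw [pvCnt_append, pvCnt_singleton, if_neg (fun e => hkk e.symm)]
          omega
        rw [this]

    -- the new sorted list
    have hsorted : PySem.List.pySetD (pvSortedInv (q ++ [x]) s)
        (PySem.List.pyGetD (pvCountsInv (q ++ [x]) s) (x - 1) 0 - 1) x
        = pvSortedInv q (x :: s) := by
      rw [hc]
      have hpos : ((pvLoff ((q ++ [x]) ++ s) (pvKey x) + pvCnt (q ++ [x]) (pvKey x) : Nat) : Int) - 1
          = ((pvLoff ((q ++ [x]) ++ s) (pvKey x) + pvCnt q (pvKey x) : Nat) : Int) := by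
        rw [hcntp]; push_cast; ring
      rw [hpos, PySem.List.pySetD_of_nonneg _ _ (by omega), Int.toNat_natCast]
      unfold pvSortedInv
      have hkb : pvKey x < ((List.range 10).map (pvSeg (q ++ [x]) s)).length := by
        simp [pvKey_lt x]
      have hseg : ((List.range 10).map (pvSeg (q ++ [x]) s))[pvKey x]'hkb = pvSeg (q ++ [x]) s (pvKey x) := by
        simp
      have hm : pvCnt q (pvKey x) < (((List.range 10).map (pvSeg (q ++ [x]) s))[pvKey x]'hkb).length := by
        rw [hseg, pvLen_seg, hcntp]; omega
      have hsum : pvLoff ((q ++ [x]) ++ s) (pvKey x)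
          = ((((List.range 10).map (pvSeg (q ++ [x]) s)).take (pvKey x)).map List.length).sum := by
        rw [pvTake_sum _ _ _ (le_of_lt (pvKey_lt x))]
      rw [hsum, pvFlatten_set _ (pvKey x) (pvCnt q (pvKey x)) hkb hm x]
      -- now show the two flattens are equal
      congr 1
      rw [hseg, pvSet_map_range 10 (pvKey x) (pvKey_lt x)]
      apply pvMap_range_congr
      intro k hk
      by_cases hkk : k = pvKey x
      · subst hkk
        rw [if_pos rfl]
        unfold pvSeg
        have hfil : List.filter (fun y => pvKey y = pvKey x) (x :: s)
            = x :: List.filter (fun y => pvKey y = pvKey x) s := by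
          rw [List.filter_cons, if_pos (by simp)]
        rw [hcntp, pvSet_replicate, hfil]
      · rw [if_neg hkk]
        unfold pvSeg
        have h1 : pvCnt (q ++ [x]) k = pvCnt q k := by
          rw [pvCnt_append, pvCnt_singleton, if_neg (fun e => hkk e.symm)]
          omega
        have h2 : List.filter (fun y => pvKey y = k) (x :: s)
            = List.filter (fun y => pvKey y = k) s := by
          rw [List.filter_cons, if_neg (by simp only [decide_eq_true_eq]; exact fun e => hkk e.symm)]
        rw [h1, h2]
    rw [hcounts, hsorted, ih (x :: s) hq, hassoc]

theorem pvSum_ite_zero (n j : Nat) (h : n ≤ j) :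
    ((List.range n).map (fun k => if j = k then (1:Nat) else 0)).sum = 0 := by
  induction n with
  | zero => simp
  | succ n ih =>
    rw [List.range_succ, List.map_append, List.sum_append, ih (by omega)]
    simp
    omega

theorem pvSum_ite (n j : Nat) (h : j < n) :
    ((List.range n).map (fun k => if j = k then (1:Nat) else 0)).sum = 1 := by
  induction n with
  | zero => omega
  | succ n ih =>
    rw [List.range_succ, List.map_append, List.sum_append]
    by_cases hj : j = n
    · subst hj
      rw [pvSum_ite_zero j j le_rfl]
      simp
    · rw [ih (by omega)]
      simp [hj]

theorem pvSum_map_add (n : Nat) (f g : Nat → Nat) :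
    ((List.range n).map (fun k => f k + g k)).sum
      = ((List.range n).map f).sum + ((List.range n).map g).sum := by
  induction n with
  | zero => simp
  | succ n ih =>
    rw [List.range_succ]
    simp only [List.map_append, List.sum_append, List.map_cons, List.map_nil,
      List.sum_cons, List.sum_nil, ih]
    omega

theorem pvSum_cnt (l : List Int) :
    ((List.range 10).map (fun k => pvCnt l k)).sum = l.length := by
  induction l with
  | nil => simp [pvCnt]
  | cons x l ih =>
    have hrw : ((List.range 10).map (fun k => pvCnt (x :: l) k))
        = (List.range 10).map (fun k => pvCnt l k + (if pvKey x = k then 1 else 0)) := by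
      apply pvMap_range_congr
      intro k hk
      rw [pvCnt_cons]
    rw [hrw, pvSum_map_add, ih, pvSum_ite 10 (pvKey x) (pvKey_lt x)]
    simp

theorem pvFlatten_replicate (n : Nat) (g : Nat → Nat) :
    (((List.range n).map (fun k => List.replicate (g k) (0:Int))).flatten)
      = List.replicate (((List.range n).map g).sum) 0 := by
  induction n with
  | zero => simp
  | succ n ih =>
    rw [List.range_succ]
    simp only [List.map_append, List.flatten_append, List.map_cons, List.map_nil,
      List.sum_append, List.sum_cons, List.sum_nil, List.flatten_cons, List.flatten_nil, ih]
    rw [List.append_nil, ← List.replicate_add]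
    norm_num

theorem pvCast_sum (l : List Nat) : ((l.sum : Nat) : Int) = (l.map (fun n => (n:Int))).sum := by
  induction l with
  | nil => simp
  | cons a l ih => simp [ih]

-- conversions of index loops to element folds
theorem pvCount_conv (numbers : List Int) (init : List Int) :
    pvCountPass numbers init
      = numbers.foldl (fun counts x =>
          PySem.List.pySetD counts (x - 1) (PySem.List.pyGetD counts (x - 1) 0 + 1)) init := by
  unfold pvCountPass
  have h := PySem.List.map_pyGetD_pyRange_zero' numbers (0:Int)
  conv_rhs => rw [← h]
  rw [List.foldl_map]

theorem pvPlace_conv (numbers : List Int) (init : List Int × List Int) :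
    pvPlacePass numbers init
      = numbers.reverse.foldl (fun st x =>
          (PySem.List.pySetD st.1 (x - 1) (PySem.List.pyGetD st.1 (x - 1) 0 - 1),
           PySem.List.pySetD st.2 (PySem.List.pyGetD st.1 (x - 1) 0 - 1) x)) init := by
  unfold pvPlacePass
  have h := PySem.List.map_pyGetD_pyRange_zero' numbers (0:Int)
  conv_rhs => rw [← h]
  rw [← List.map_reverse, List.foldl_map]

theorem pvCum_cnt (l : List Int) (k : Nat) :
    pvCum (fun j => (pvCnt l j : Int)) k = ((pvLoff l k + pvCnt l k : Nat) : Int) := by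
  unfold pvCum pvLoff
  rw [List.range_succ, List.map_append, List.sum_append]
  push_cast [pvCast_sum]
  simp only [List.map_map]
  rfl

theorem pvBucketLemma (l : List Int) (hl : ∀ x ∈ l, -9 ≤ x ∧ x ≤ 10) (g : Nat → List Int) :
    pvBucketPass l ((List.range 10).map g)
      = (List.range 10).map (fun k => g k ++ l.filter (fun x => pvKey x = k)) := by
  induction l generalizing g with
  | nil =>
    unfold pvBucketPass
    simp
  | cons x l ih =>
    have hx := hl x (by simp)
    have hlen : ((List.range 10).map g).length = 10 := by simp
    unfold pvBucketPass at *
    rw [List.foldl_cons,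
        pvPyGetD_key _ hlen x hx [],
        pvPySetD_key _ hlen x hx,
        PySem.List.getD_map_range g 10 (pvKey x) [] (pvKey_lt x),
        pvSet_map_range 10 (pvKey x) (pvKey_lt x) g,
        ih (fun y hy => hl y (by simp [hy]))]
    apply pvMap_range_congr
    intro k hk
    by_cases hkk : k = pvKey x
    · subst hkk
      rw [if_pos rfl, List.filter_cons, if_pos (by simp), List.append_assoc, List.singleton_append]
    · rw [if_neg hkk, List.filter_cons,
          if_neg (by simp only [decide_eq_true_eq]; exact fun e => hkk e.symm)]

theorem pvFoldl_append (bs : List (List Int)) (acc : List Int) :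
    bs.foldl (fun r b => r ++ b) acc = acc ++ bs.flatten := by
  induction bs generalizing acc with
  | nil => simp
  | cons b bs ih => rw [List.foldl_cons, ih, List.flatten_cons, List.append_assoc]

theorem pvMain (numbers : List Int) (h : ∀ x ∈ numbers, -9 ≤ x ∧ x ≤ 10) :
    stable_countsort numbers = stable_countsort_alt numbers := by
  have hrepl0 : List.replicate 10 (0:Int) = (List.range 10).map (fun _ => (0:Int)) := by
    simp [List.map_const']
  have hreplnil : List.replicate 10 ([] : List Int) = (List.range 10).map (fun _ => ([] : List Int)) := by
    simp [List.map_const']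
  -- A side
  have hA1 : pvCountPass numbers (List.replicate 10 0)
      = (List.range 10).map (fun k => (pvCnt numbers k : Int)) := by
    rw [pvCount_conv, hrepl0, pvPhase1 numbers h]
    apply pvMap_range_congr
    intro k hk
    ring
  have hA2 : pvCumPass (pvCountPass numbers (List.replicate 10 0)) = pvCountsInv numbers [] := by
    rw [hA1]
    unfold pvCumPass
    have h10 : (10 : Int) = ((10 : Nat) : Int) := by norm_num
    rw [h10, pvPhase2Aux (fun k => (pvCnt numbers k : Int)) 10 (by norm_num) le_rfl]
    unfold pvCountsInv
    apply pvMap_range_congr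
    intro k hk
    rw [if_pos hk, pvCum_cnt, List.append_nil]
  have hA3 : List.replicate numbers.length (0:Int) = pvSortedInv numbers [] := by
    unfold pvSortedInv
    have : (List.range 10).map (pvSeg numbers [])
        = (List.range 10).map (fun k => List.replicate (pvCnt numbers k) (0:Int)) := by
      apply pvMap_range_congr
      intro k hk
      unfold pvSeg
      simp
    rw [this, pvFlatten_replicate, pvSum_cnt]
  have hA : stable_countsort numbers = pvSortedInv [] numbers := by
    unfold stable_countsort
    rw [hA2, hA3, pvPlace_conv, pvPhase3 numbers [] h]
    simp
  -- B side
  have hB : stable_countsort_alt numbers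
      = ((List.range 10).map (fun k => numbers.filter (fun x => pvKey x = k))).flatten := by
    unfold stable_countsort_alt
    rw [hreplnil, pvBucketLemma numbers h, pvFoldl_append]
    simp
  rw [hA, hB]
  unfold pvSortedInv
  congr 1

-- ===== VERDICT (by name: the statement is the Claim_ definition above) =====
theorem stable_countsort_spec : Claim_equal_stable_countsort := by
  intro numbers _ hpre
  unfold Spec_stable_countsort
  exact pvMain numbers hpre
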